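-- pv_equiv track=rewrite | github.com/ece-jacob-scott/advent-of-code | year-2022/day-8/main.py | searcher
-- ===== SOURCE A (Python) =====
-- from typing import List, Set, Tuple, Dict
--
-- def searcher(
--         tree_line_original: List[int],
--         rev: bool,
--         found_trees: Set[Tuple[int, int]],
--         horizontal: bool,
--         counter_axis: int) -> int:
--     tree_line = [*tree_line_original]
--
--     if rev:
--         tree_line.reverse()
--
--     tallest_tree = -1
--     answer = 0
--     for i in range(len(tree_line)):
--         tree = tree_line[i]
--
--         if not rev:
--             axis = i
--         else:
--             axis = len(tree_line) - 1 - i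
--
--         if horizontal:
--             coordinates = (axis, counter_axis)
--         else:
--             coordinates = (counter_axis, axis)
--
--         if tree > tallest_tree:
--             if not coordinates in found_trees:
--                 answer += 1
--             tallest_tree = tree
--             found_trees.add(coordinates)
--
--     return answer
-- ===== SOURCE B (Python) =====
-- def searcher(tree_line_original, rev, found_trees, horizontal, counter_axis):
--     # A tree is visible iff it is strictly taller than every tree between it and
--     # its viewing edge (edge sentinel height -1).  Check that per tree by brute
--     # force on the original list (never reversing it), then batch-update the set.
--     answer = 0
--     newly = []
--     for k, tree in enumerate(tree_line_original):
--         blocking = tree_line_original[k + 1:] if rev else tree_line_original[:k]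
--         if tree > max([-1] + blocking):
--             coord = (k, counter_axis) if horizontal else (counter_axis, k)
--             if coord not in found_trees:
--                 answer += 1
--             newly.append(coord)
--     found_trees.update(newly)
--     return answer
-- ===== Notes on version B (the rewrite author's own statement) =====
-- stated objective: alternative
-- what changed: Replaces A's reversed-copy single pass with a running maximum and interleaved set mutation by a per-tree brute-force check: for each original index k it tests the tree against max([-1] + blocking slice) (prefix for left view, suffix for right view), counts against the pre-call set and batch-updates the set afterwards; O(n^2) instead of O(n), correct because visibility means strictly taller than every blocking tree and the per-call coordinates are pairwise distinct.
import Mathlib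
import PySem

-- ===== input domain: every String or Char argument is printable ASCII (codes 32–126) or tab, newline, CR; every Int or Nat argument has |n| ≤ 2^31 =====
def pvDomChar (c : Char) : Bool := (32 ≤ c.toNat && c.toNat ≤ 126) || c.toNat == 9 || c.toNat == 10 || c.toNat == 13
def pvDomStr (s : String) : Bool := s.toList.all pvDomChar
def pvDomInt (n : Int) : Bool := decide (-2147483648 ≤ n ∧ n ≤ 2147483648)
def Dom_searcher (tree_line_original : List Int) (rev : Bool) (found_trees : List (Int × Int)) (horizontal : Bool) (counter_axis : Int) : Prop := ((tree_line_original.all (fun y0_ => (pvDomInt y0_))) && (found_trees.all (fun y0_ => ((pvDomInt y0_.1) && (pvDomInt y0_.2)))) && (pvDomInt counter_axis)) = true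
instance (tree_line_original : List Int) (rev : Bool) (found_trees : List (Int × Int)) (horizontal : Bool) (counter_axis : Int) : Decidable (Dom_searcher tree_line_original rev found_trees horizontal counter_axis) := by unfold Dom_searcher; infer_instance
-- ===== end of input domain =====

-- B replaces A's reversed-copy running-max scan by a per-tree brute-force visibility check over the
-- original list with a batch set update; equal RETURN value is proved here — both Pythons also
-- mutate found_trees, and they add exactly the same coordinates to it.

-- ===== PORT A =====
-- A's loop 'for i in range(len(tree_line))' with tree_line[i]: foldl over pyRange with pyGetD
-- (index always in range), state = (tallest_tree, answer, found), found a PySem.Set.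
def searcher (tree_line_original : List Int) (rev : Bool) (found_trees : List (Int × Int)) (horizontal : Bool) (counter_axis : Int) : Int :=
  let tree_line := if rev then tree_line_original.reverse else tree_line_original
  let final : Int × Int × PySem.Set (Int × Int) :=
    (PySem.List.pyRange 0 (PySem.List.len tree_line) 1).foldl
      (fun (s : Int × Int × PySem.Set (Int × Int)) i =>
        let tree := PySem.List.pyGetD tree_line i 0
        let axis : Int := if !rev then i else PySem.List.len tree_line - 1 - i
        let coordinates : Int × Int := if horizontal then (axis, counter_axis) else (counter_axis, axis)
        if tree > s.1 then
          (tree,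
           (if PySem.Set.contains s.2.2 coordinates then s.2.1 else s.2.1 + 1),
           PySem.Set.add s.2.2 coordinates)
        else s)
      (-1, 0, found_trees)
  final.2.1

-- ===== PORT B =====
-- Source B: loop over enumerate(tree_line_original), blocking = the slice towards the viewing edge,
-- visible iff tree > max([-1] + blocking); state = (answer, newly); found_trees.update(newly)
-- at the end does not affect the return value.
def searcher_alt (tree_line_original : List Int) (rev : Bool) (found_trees : List (Int × Int)) (horizontal : Bool) (counter_axis : Int) : Int :=
  let st : Int × List (Int × Int) :=
    (PySem.List.enumerate tree_line_original 0).foldl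
      (fun (s : Int × List (Int × Int)) p =>
        let blocking := if rev then PySem.List.slice tree_line_original (some (p.1 + 1)) none
                        else PySem.List.slice tree_line_original none (some p.1)
        if p.2 > (PySem.List.max? ((-1) :: blocking) (fun y => y)).getD 0 then
          let coord : Int × Int := if horizontal then (p.1, counter_axis) else (counter_axis, p.1)
          ((if PySem.Set.contains found_trees coord then s.1 else s.1 + 1), s.2 ++ [coord])
        else s)
      (0, [])
  st.1

-- ===== PRECONDITION & SPEC =====
def Spec_searcher (tree_line_original : List Int) (rev : Bool) (found_trees : List (Int × Int)) (horizontal : Bool) (counter_axis : Int) (out : Int) : Prop := out = searcher_alt tree_line_original rev found_trees horizontal counter_axis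
instance (tree_line_original : List Int) (rev : Bool) (found_trees : List (Int × Int)) (horizontal : Bool) (counter_axis : Int) (out : Int) : Decidable (Spec_searcher tree_line_original rev found_trees horizontal counter_axis out) := by unfold Spec_searcher; infer_instance

-- ===== CLAIM (what is proved, stated in full; the proofs are below) =====
def Claim_equal_searcher : Prop := ∀ (tree_line_original : List Int) (rev : Bool) (found_trees : List (Int × Int)) (horizontal : Bool) (counter_axis : Int), Dom_searcher tree_line_original rev found_trees horizontal counter_axis → Spec_searcher tree_line_original rev found_trees horizontal counter_axis (searcher tree_line_original rev found_trees horizontal counter_axis)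

-- ===== LEMMAS AND PROOFS =====

-- A's coordinate map, as a function of the position i in the scanned (possibly reversed) line.
def pvCoord (rev horizontal : Bool) (counter_axis n : Int) (i : Int) : Int × Int :=
  let axis : Int := if rev then n - 1 - i else i
  if horizontal then (axis, counter_axis) else (counter_axis, axis)

-- The number of newly-visible trees along l with running maximum t, coordinates C i, C (i+1), …,
-- counted against the fixed set ft0.
def pvCountB (C : Int → Int × Int) (ft0 : List (Int × Int)) : List Int → Int → Int → Nat
  | [], _, _ => 0
  | h :: r, t, i =>
    (if h > t && !(PySem.Set.contains ft0 (C i)) then 1 else 0) + pvCountB C ft0 r (max t h) (i + 1)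

theorem pvCoord_injective (rev horizontal : Bool) (ca n : Int) :
    Function.Injective (pvCoord rev horizontal ca n) := by
  intro x y hxy
  simp only [pvCoord] at hxy
  split_ifs at hxy <;> simp [Prod.ext_iff] at hxy <;> omega

-- A's loop over 'enumerate' with state (t, a, f) returns a + pvCountB, provided f agrees with ft0
-- on every coordinate the loop can still test (the set grows only by coordinates already passed).
theorem pvLoopA_eq (C : Int → Int × Int) (hC : Function.Injective C) (ft0 : List (Int × Int)) :
    ∀ (l : List Int) (i t a : Int) (f : PySem.Set (Int × Int)),
      (∀ k : Int, i ≤ k → PySem.Set.contains f (C k) = PySem.Set.contains ft0 (C k)) →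
      ((PySem.List.enumerate l i).foldl
        (fun (s : Int × Int × PySem.Set (Int × Int)) p =>
          if p.2 > s.1 then
            (p.2, (if PySem.Set.contains s.2.2 (C p.1) then s.2.1 else s.2.1 + 1),
             PySem.Set.add s.2.2 (C p.1))
          else s) (t, a, f)).2.1
      = a + (pvCountB C ft0 l t i : Int) := by
  intro l
  induction l with
  | nil => intro i t a f _; simp [PySem.List.enumerate_nil, pvCountB]
  | cons h r ih =>
    intro i t a f H
    rw [PySem.List.enumerate_cons, List.foldl_cons]
    by_cases hgt : h > t
    · have hmem : PySem.Set.contains f (C i) = PySem.Set.contains ft0 (C i) := H i le_rfl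
      have H' : ∀ k : Int, i + 1 ≤ k →
          PySem.Set.contains (PySem.Set.add f (C i)) (C k) = PySem.Set.contains ft0 (C k) := by
        intro k hk
        have hne : C k ≠ C i := fun hEq => by have := hC hEq; omega
        have hstep : PySem.Set.contains (PySem.Set.add f (C i)) (C k)
            = PySem.Set.contains f (C k) := by
          simp only [PySem.Set.contains]
          simp [PySem.Set.mem_add, hne]
        rw [hstep]; exact H k (by omega)
      have hrec := ih (i + 1) h (if PySem.Set.contains f (C i) then a else a + 1)
        (PySem.Set.add f (C i)) H'
      simp only [hgt, if_pos, gt_iff_lt] at hrec ⊢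
      rw [hrec, pvCountB, hmem, max_eq_right (le_of_lt hgt)]
      by_cases hm : C i ∈ ft0
      · simp [hgt, hm]
      · simp [hgt, hm]
        ring
    · rw [if_neg hgt]
      rw [ih (i + 1) t a f (fun k hk => H k (by omega))]
      rw [pvCountB, max_eq_left (not_lt.mp hgt)]
      simp [hgt]

theorem pvFoldlMaxComm : ∀ (xs : List Int) (a x : Int),
    max (xs.foldl max a) x = xs.foldl max (max a x) := by
  intro xs
  induction xs with
  | nil => intro a x; rfl
  | cons h r ih =>
    intro a x
    simp only [List.foldl_cons]
    rw [ih (max a h) x, max_right_comm a x h]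

theorem pvFoldlMaxRev : ∀ (xs : List Int) (a : Int),
    xs.reverse.foldl max a = xs.foldl max a := by
  intro xs
  induction xs with
  | nil => intro a; rfl
  | cons h r ih =>
    intro a
    simp only [List.reverse_cons, List.foldl_append, List.foldl_cons, List.foldl_nil]
    rw [ih a, pvFoldlMaxComm]

-- pvCountB as a countP over positions: position j counts iff l[j] beats the max of t and
-- everything before it, and its coordinate is not in the fixed set.
theorem pvCountB_eq_countP (C : Int → Int × Int) (ft0 : List (Int × Int)) :
    ∀ (l : List Int) (t i : Int),
      pvCountB C ft0 l t i
      = (List.range l.length).countP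
          (fun j => decide (l.getD j 0 > (l.take j).foldl max t)
                    && !(PySem.Set.contains ft0 (C (i + (j : Int))))) := by
  intro l
  induction l with
  | nil => intro t i; simp [pvCountB]
  | cons h r ih =>
    intro t i
    rw [pvCountB, ih (max t h) (i + 1)]
    rw [List.length_cons, List.range_succ_eq_map, List.countP_cons, List.countP_map]
    have hfun : ((fun (j : Nat) => decide ((h :: r).getD j 0 > ((h :: r).take j).foldl max t)
            && !(PySem.Set.contains ft0 (C (i + (j : Int))))) ∘ Nat.succ)
        = (fun (j : Nat) => decide (r.getD j 0 > (r.take j).foldl max (max t h))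
            && !(PySem.Set.contains ft0 (C (i + 1 + (j : Int))))) := by
      funext j
      simp only [Function.comp, List.getD_cons_succ, List.take_succ_cons, List.foldl_cons]
      have : i + ((j : Int) + 1) = i + 1 + (j : Int) := by ring
      rw [Nat.cast_succ, this]
    rw [hfun]
    simp only [List.getD_cons_zero, List.take_zero, List.foldl_nil, Nat.cast_zero, add_zero]
    by_cases h1 : h > t <;> by_cases h2 : (C i) ∈ ft0 <;>
      simp [PySem.Set.contains, h1, h2, Nat.add_comm]

-- countP over enumerate as a countP over positions.
theorem pvEnumCountP (f : Int × Int → Bool) :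
    ∀ (l : List Int) (s : Int),
      (PySem.List.enumerate l s).countP f
      = (List.range l.length).countP (fun (j : Nat) => f (s + (j : Int), l.getD j 0)) := by
  intro l
  induction l with
  | nil => intro s; simp [PySem.List.enumerate_nil]
  | cons h r ih =>
    intro s
    rw [PySem.List.enumerate_cons, List.countP_cons, ih (s + 1)]
    rw [List.length_cons, List.range_succ_eq_map, List.countP_cons, List.countP_map]
    have hfun : ((fun (j : Nat) => f (s + (j : Int), (h :: r).getD j 0)) ∘ Nat.succ)
        = (fun (j : Nat) => f (s + 1 + (j : Int), r.getD j 0)) := by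
      funext j
      simp only [Function.comp, List.getD_cons_succ]
      have : s + ((j : Int) + 1) = s + 1 + (j : Int) := by ring
      rw [Nat.cast_succ, this]
    rw [hfun]
    simp

-- B's loop shape: a counter plus an appended list, reduced to a countP against the fixed set.
theorem pvBfold (E : Int → Int) (ft : List (Int × Int)) (cf : Int → Int × Int) :
    ∀ (q : List (Int × Int)) (a : Int) (ns : List (Int × Int)),
      (q.foldl
        (fun (s : Int × List (Int × Int)) p =>
          if p.2 > E p.1 then
            ((if PySem.Set.contains ft (cf p.1) then s.1 else s.1 + 1), s.2 ++ [cf p.1])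
          else s) (a, ns)).1
      = a + ((q.countP (fun p => decide (p.2 > E p.1)
              && !(PySem.Set.contains ft (cf p.1)))) : Int) := by
  intro q
  induction q with
  | nil => intro a ns; simp
  | cons p r ih =>
    intro a ns
    rw [List.foldl_cons, List.countP_cons]
    by_cases h1 : p.2 > E p.1
    · by_cases h2 : PySem.Set.contains ft (cf p.1) = true
      · simp only [h1, if_pos, h2, if_true]
        rw [ih]
        simp [h1, h2]
      · simp only [h1, if_pos]
        rw [if_neg h2, ih]
        simp only [eq_false_of_ne_true h2] at *
        simp [h1, h2]
        ring
    · rw [if_neg h1, ih]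
      simp [h1]

-- A reduced to a countP over positions of the scanned line.
theorem pvASide (tlo line : List Int) (rev horizontal : Bool) (ft : List (Int × Int)) (ca : Int)
    (hline : (if rev then tlo.reverse else tlo) = line) :
    searcher tlo rev ft horizontal ca
    = ((List.range line.length).countP
        (fun (j : Nat) => decide (line.getD j 0 > (line.take j).foldl max (-1))
          && !(PySem.Set.contains ft (pvCoord rev horizontal ca (line.length : Int) (j : Int)))) : Int) := by
  have hA := pvLoopA_eq (pvCoord rev horizontal ca (line.length : Int))
      (pvCoord_injective rev horizontal ca (line.length : Int)) ft line 0 (-1) 0 ft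
      (fun _ _ => rfl)
  rw [PySem.List.enumerate_eq_map_pyRange line 0, List.foldl_map, zero_add] at hA
  rw [pvCountB_eq_countP] at hA
  simp only [zero_add] at hA
  simp only [searcher, hline]
  rw [← hA]
  congr 1
  apply congrArg
  rw [PySem.List.len_eq]
  apply PySem.List.foldl_congr_mem
  intro s j _
  simp only [pvCoord]
  cases rev <;> cases horizontal <;> simp

-- B reduced to a countP over original positions.
theorem pvBSide (tlo : List Int) (rev horizontal : Bool) (ft : List (Int × Int)) (ca : Int) :
    searcher_alt tlo rev ft horizontal ca
    = ((List.range tlo.length).countP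
        (fun (j : Nat) => decide (tlo.getD j 0 >
            ((if rev then tlo.drop (j + 1) else tlo.take j).foldl max (-1)))
          && !(PySem.Set.contains ft (if horizontal then ((j : Int), ca) else (ca, (j : Int))))) : Int) := by
  simp only [searcher_alt]
  have hB := pvBfold
    (fun i => (PySem.List.max? ((-1) :: (if rev then PySem.List.slice tlo (some (i + 1)) none
        else PySem.List.slice tlo none (some i))) (fun y => y)).getD 0)
    ft (fun i => if horizontal then (i, ca) else (ca, i))
    (PySem.List.enumerate tlo 0) 0 []
  simp only at hB
  rw [hB, pvEnumCountP]
  simp only [zero_add]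
  congr 2
  funext j
  have hj1 : ((j : Int) + 1) = ((j + 1 : Nat) : Int) := by push_cast; ring
  rw [hj1, PySem.List.slice_from_natCast, PySem.List.slice_to_natCast]
  cases rev <;> simp [PySem.List.max?_id_cons]

-- reverse-index pointwise facts for the rev = true case.
theorem pvRevGetD (l : List Int) (j : Nat) (hj : j < l.length) :
    l.reverse.getD (l.length - 1 - j) 0 = l.getD j 0 := by
  have h1 : l.length - 1 - j < l.reverse.length := by simp; omega
  have h2 : j < l.length := hj
  rw [List.getD_eq_getElem _ _ h1, List.getD_eq_getElem _ _ h2, List.getElem_reverse]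
  congr 1
  omega

theorem pvRevTake (l : List Int) (j : Nat) (hj : j < l.length) :
    (l.reverse.take (l.length - 1 - j)).foldl max (-1) = (l.drop (j + 1)).foldl max (-1) := by
  rw [List.take_reverse, pvFoldlMaxRev]
  congr 2
  omega

-- ===== VERDICT (by name: the statement is the Claim_ definition above) =====
theorem searcher_spec : Claim_equal_searcher := by
  intro tlo rev ft horizontal ca _
  show searcher tlo rev ft horizontal ca = searcher_alt tlo rev ft horizontal ca
  rw [pvBSide]
  cases rev
  · rw [pvASide tlo tlo false horizontal ft ca rfl]
    congr 2
  · rw [pvASide tlo tlo.reverse true horizontal ft ca rfl]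
    simp only [List.length_reverse]
    congr 1
    rw [← List.countP_reverse, List.range_eq_range', List.reverse_range', List.countP_map,
      ← List.range_eq_range']
    apply List.countP_congr
    intro j hj
    rw [List.mem_range] at hj
    have hjlt : j < tlo.length := hj
    have key : ((fun (k : Nat) => decide (tlo.reverse.getD k 0 > (tlo.reverse.take k).foldl max (-1))
          && !(PySem.Set.contains ft (pvCoord true horizontal ca ((tlo.length : Nat) : Int) (k : Int)))) ∘
            (fun i => 0 + tlo.length - 1 - i)) j
        = (fun (k : Nat) => decide (tlo.getD k 0 > ((tlo.drop (k + 1)).foldl max (-1)))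
          && !(PySem.Set.contains ft (if horizontal then ((k : Int), ca) else (ca, (k : Int))))) j := by
      simp only [Function.comp, Nat.zero_add]
      rw [pvRevGetD tlo j hjlt, pvRevTake tlo j hjlt]
      have hax : (tlo.length : Int) - 1 - ((tlo.length - 1 - j : Nat) : Int) = (j : Int) := by omega
      simp only [pvCoord, hax]
      simp
    rw [key]
    simp
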